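-- pv_equiv track=rewrite | github.com/theislab/mubind | mubind/tl/encoding.py | string2bin
-- ===== SOURCE A (Python) =====
-- dict_dna = "ACGT"
--
-- dict_prot = "ACDEFGHIKLMNPQRSTVWY"
--
-- def string2bin(s, mode="dna"):
--     code = None
--     if mode == "dna":
--         code = dict_dna
--     elif mode == "protein":
--         code = dict_prot
--
--     q = " %s" % code
--     return sum(5**i * q.index(p) for i, p in enumerate(s))
-- ===== SOURCE B (Python) =====
-- dict_dna = "ACGT"
--
-- dict_prot = "ACDEFGHIKLMNPQRSTVWY"
--
-- def string2bin(s, mode="dna"):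
--     code = None
--     if mode == "dna":
--         code = dict_dna
--     elif mode == "protein":
--         code = dict_prot
--
--     table = {c: i for i, c in enumerate(" %s" % code)}
--     result = 0
--     for p in reversed(s):
--         result = result * 5 + table[p]
--     return result
-- ===== Notes on version B (the rewrite author's own statement) =====
-- stated objective: alternative
-- what changed: Builds a char->digit dictionary once from the alphabet and evaluates the base-5 polynomial by a Horner multiply-add pass over the reversed string, instead of A's power-weighted sum with a q.index linear scan per character.
import Mathlib
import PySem

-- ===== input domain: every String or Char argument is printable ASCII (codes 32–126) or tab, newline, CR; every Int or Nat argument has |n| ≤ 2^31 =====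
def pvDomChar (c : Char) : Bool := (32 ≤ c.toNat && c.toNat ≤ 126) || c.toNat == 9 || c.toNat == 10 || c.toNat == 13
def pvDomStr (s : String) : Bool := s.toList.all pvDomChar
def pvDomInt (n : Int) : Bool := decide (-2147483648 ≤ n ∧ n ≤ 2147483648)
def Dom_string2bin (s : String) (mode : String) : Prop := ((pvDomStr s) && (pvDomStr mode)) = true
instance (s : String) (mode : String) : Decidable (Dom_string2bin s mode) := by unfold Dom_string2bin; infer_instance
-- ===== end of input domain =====

-- B builds a char->digit dictionary once and evaluates the base-5 polynomial by Horner
-- multiply-adds over the reversed string, replacing A's 5**i powers and per-character q.index scans.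

def dict_dna : String := "ACGT"
def dict_prot : String := "ACDEFGHIKLMNPQRSTVWY"

-- q = " %s" % code, as a list of chars (code = None prints as "None"); shared by both ports
def qOf (mode : String) : List Char :=
  ' ' :: (if mode == "dna" then dict_dna.toList
          else if mode == "protein" then dict_prot.toList
          else "None".toList)

-- ===== PORT A =====
-- sum(5**i * q.index(p) for i, p in enumerate(s)); q.index raises outside Pre_, modeled by getD 0
def string2bin (s : String) (mode : String) : Int :=
  let q := qOf mode
  ((PySem.List.enumerate s.toList 0).map
    (fun ip => (5 : Int) ^ ip.1.toNat * ((PySem.List.index? q ip.2).getD 0 : Nat))).sum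

-- ===== PORT B =====
-- table = {c: i for i, c in enumerate(q)}; result = 0; for p in reversed(s): result = result * 5 + table[p]
-- table[p] raises KeyError outside Pre_, modeled by getD 0
def string2bin_alt (s : String) (mode : String) : Int :=
  let table : PySem.Dict Char Int :=
    (PySem.List.enumerate (qOf mode) 0).foldl (fun d ic => d.insert ic.2 ic.1) PySem.Dict.empty
  s.toList.reverse.foldl (fun r p => r * 5 + (table.get? p).getD 0) 0

-- ===== PRECONDITION & SPEC =====
-- Pre_ excludes exactly the inputs where Python's q.index(p) raises ValueError (a character of s not in q).
def Pre_string2bin (s : String) (mode : String) : Prop :=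
  (s.toList.all (fun c => (qOf mode).contains c)) = true
instance (s : String) (mode : String) : Decidable (Pre_string2bin s mode) := by
  unfold Pre_string2bin; infer_instance

def pvWitness_string2bin : String × String := ("GATTACA", "dna")

def Spec_string2bin (s : String) (mode : String) (out : Int) : Prop := out = string2bin_alt s mode
instance (s : String) (mode : String) (out : Int) : Decidable (Spec_string2bin s mode out) := by
  unfold Spec_string2bin; infer_instance

-- ===== CLAIM (what is proved, stated in full; the proofs are below) =====
def Claim_equal_string2bin : Prop := ∀ (s : String) (mode : String), Dom_string2bin s mode → Pre_string2bin s mode → Spec_string2bin s mode (string2bin s mode)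

-- ===== LEMMAS AND PROOFS =====

-- looking up the dict built from enumerate of a duplicate-free list gives start + first index
theorem pv_table_get (l : List Char) (d : PySem.Dict Char Int) (n : Int) (hnd : l.Nodup) (c : Char) :
    ((PySem.List.enumerate l n).foldl (fun d ic => d.insert ic.2 ic.1) d).get? c
      = match PySem.List.index? l c with
        | some k => some (n + k)
        | none => d.get? c := by
  induction l generalizing d n with
  | nil => simp [PySem.List.enumerate_nil, PySem.List.index?]
  | cons a t ih =>
    rcases List.nodup_cons.mp hnd with ⟨ha, hnt⟩
    rw [PySem.List.enumerate_cons, List.foldl_cons, ih _ _ hnt]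
    by_cases hc : c = a
    · subst hc
      rw [(PySem.List.index?_eq_none_iff t c).mpr ha, PySem.List.index?_cons_self]
      simp [PySem.Dict.get?_insert_self]
    · rw [PySem.List.index?_cons_of_ne _ (Ne.symm hc),
        PySem.Dict.get?_insert_of_ne _ _ hc]
      cases PySem.List.index? t c with
      | none => simp
      | some k => simp; push_cast; ring

theorem pv_qOf_nodup (mode : String) : (qOf mode).Nodup := by
  unfold qOf
  by_cases h1 : mode == "dna"
  · rw [if_pos h1]; decide
  · rw [if_neg h1]
    by_cases h2 : mode == "protein"
    · rw [if_pos h2]; decide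
    · rw [if_neg h2]; decide

-- B's dictionary digit agrees with A's q.index digit (both default 0 for chars not in q)
theorem pv_digit_eq (mode : String) (c : Char) :
    (((PySem.List.enumerate (qOf mode) 0).foldl (fun d ic => d.insert ic.2 ic.1)
        PySem.Dict.empty).get? c).getD 0
      = (((PySem.List.index? (qOf mode) c).getD 0 : Nat) : Int) := by
  rw [pv_table_get _ _ _ (pv_qOf_nodup mode) c]
  cases PySem.List.index? (qOf mode) c with
  | none => simp [PySem.Dict.get?_empty]
  | some k => simp

-- the power-weighted sum starting at index n equals 5^n times the Horner evaluation
theorem pv_sum_eq_horner (f : Char → Int) (l : List Char) (n : Nat) :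
    ((PySem.List.enumerate l (n : Int)).map (fun ip => (5 : Int) ^ ip.1.toNat * f ip.2)).sum
      = 5 ^ n * l.foldr (fun p r => r * 5 + f p) 0 := by
  induction l generalizing n with
  | nil => simp [PySem.List.enumerate_nil]
  | cons c t ih =>
    have h1 : ((n : Int) + 1) = ((n + 1 : Nat) : Int) := by push_cast; ring
    simp only [PySem.List.enumerate_cons, List.map_cons, List.sum_cons, h1, ih,
      Int.toNat_natCast, List.foldr_cons, pow_succ]
    ring

theorem string2bin_eq (s mode : String) : string2bin s mode = string2bin_alt s mode := by
  simp only [string2bin, string2bin_alt, List.foldl_reverse, pv_digit_eq]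
  have := pv_sum_eq_horner
    (fun p => (((PySem.List.index? (qOf mode) p).getD 0 : Nat) : Int)) s.toList 0
  simpa using this

-- ===== VERDICT (by name: the statement is the Claim_ definition above) =====
theorem string2bin_spec : Claim_equal_string2bin := by
  intro s mode _ _
  exact string2bin_eq s mode
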